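-- pv_equiv track=rewrite | github.com/qowldud95/Algorithm | programmers_신고 결과 받기.py | solution
-- ===== SOURCE A (Python) =====
-- from collections import defaultdict
--
-- def solution(id_list, report, k):
--     report = list(set(report))
--     cnt = defaultdict(int)
--     user = defaultdict(set)
--     answer = []
--     for i in report :
--         a,b = i.split(" ")
--         cnt[b] += 1
--         user[a].add(b)
--
--     for i in id_list :
--         result = 0
--         for j in user[i] :
--             if cnt[j] >= k :
--                 result += 1
--         answer.append(result)
--     return answer
-- ===== SOURCE B (Python) =====
-- def solution(id_list, report, k):
--     pairs = [r.split(" ") for r in dict.fromkeys(report)]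
--     cnt = {}
--     for a, b in pairs:
--         cnt[b] = cnt.get(b, 0) + 1
--     banned = {b for b in cnt if cnt[b] >= k}
--     result = {}
--     for a, b in pairs:
--         if b in banned:
--             result[a] = result.get(a, 0) + 1
--     return [result.get(i, 0) for i in id_list]
-- ===== Notes on version B (the rewrite author's own statement) =====
-- stated objective: alternative
-- what changed: B drops A's reporter->set-of-targets index entirely: it precomputes the banned-target set from a counting dict and then accumulates a per-reporter counter in a second pass over the deduplicated report edges, reading the answer off with result.get(i, 0).
import Mathlib
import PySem

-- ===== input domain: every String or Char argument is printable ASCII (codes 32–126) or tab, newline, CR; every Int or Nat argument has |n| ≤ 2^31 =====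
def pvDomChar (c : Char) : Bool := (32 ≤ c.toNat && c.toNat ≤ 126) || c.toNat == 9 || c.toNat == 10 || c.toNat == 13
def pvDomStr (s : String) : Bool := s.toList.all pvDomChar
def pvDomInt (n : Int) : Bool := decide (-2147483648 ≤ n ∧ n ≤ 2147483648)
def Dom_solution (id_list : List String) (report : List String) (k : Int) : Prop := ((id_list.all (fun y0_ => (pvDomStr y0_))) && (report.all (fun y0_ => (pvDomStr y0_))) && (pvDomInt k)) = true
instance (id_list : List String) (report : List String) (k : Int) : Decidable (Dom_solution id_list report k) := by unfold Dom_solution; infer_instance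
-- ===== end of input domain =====

-- B replaces A's reporter→set-of-targets index by a banned-target table and a second pass over the
-- deduplicated report edges accumulating a per-reporter counter (objective: alternative data representation).

-- ===== PORT A =====
-- 'a, b = i.split(" ")' raises ValueError unless the split has exactly 2 parts; those inputs are
-- outside Pre_solution, the catch-all match arm there is never reached on admitted inputs.
-- loop body of A's first pass: cnt[b] += 1; user[a].add(b)
def solStepA (st : PySem.Dict String Int × PySem.Dict String (PySem.Set String)) (i : String) :
    PySem.Dict String Int × PySem.Dict String (PySem.Set String) :=
  match PySem.Str.split? i " " with
  | some [a, b] =>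
      (st.1.modify b 0 (· + 1),
       st.2.modify a PySem.Set.empty (fun s => PySem.Set.add s b))
  | _ => st

def solution (id_list : List String) (report : List String) (k : Int) : List Int :=
  let rep := PySem.Set.ofList report
  let st := rep.foldl solStepA (PySem.Dict.empty, PySem.Dict.empty)
  id_list.foldl
    (fun answer i =>
      answer ++ [(st.2.getD i PySem.Set.empty).foldl
        (fun result j => if st.1.getD j 0 ≥ k then result + 1 else result) 0])
    []

-- ===== PORT B =====
-- loop body of B's counting pass: cnt[b] = cnt.get(b, 0) + 1
def solCntStep (d : PySem.Dict String Int) (p : List String) : PySem.Dict String Int :=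
  match p with
  | [_, b] => d.insert b (d.getD b 0 + 1)
  | _ => d

-- loop body of B's accumulation pass: if b in banned: result[a] = result.get(a, 0) + 1
def solResStep (banned : PySem.Set String) (d : PySem.Dict String Int) (p : List String) :
    PySem.Dict String Int :=
  match p with
  | [a, b] => if PySem.Set.contains banned b then d.insert a (d.getD a 0 + 1) else d
  | _ => d

def solution_alt (id_list : List String) (report : List String) (k : Int) : List Int :=
  let pairs := (PySem.List.dedup report).map (fun r => (PySem.Str.split? r " ").getD [])
  let cnt := pairs.foldl solCntStep PySem.Dict.empty
  let banned := PySem.Set.ofList (cnt.keys.filter (fun b => decide (cnt.getD b 0 ≥ k)))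
  let result := pairs.foldl (solResStep banned) PySem.Dict.empty
  id_list.map (fun i => result.getD i 0)

-- ===== PRECONDITION & SPEC =====
-- r.split(" ") as a total value (split? is some for the non-empty separator " ")
def pvParse (r : String) : List String := (PySem.Str.split? r " ").getD []

-- Pre_ excludes exactly the inputs where A raises ValueError: a report entry whose split on " "
-- does not have exactly two parts (no space, or more than one).
def Pre_solution (id_list : List String) (report : List String) (k : Int) : Prop :=
  ∀ r ∈ report, (pvParse r).length = 2
instance (id_list : List String) (report : List String) (k : Int) : Decidable (Pre_solution id_list report k) := by unfold Pre_solution; infer_instance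

def pvWitness_solution : List String × List String × Int :=
  (["muzi", "frodo", "apeach"], ["muzi frodo", "apeach frodo", "muzi frodo"], 2)

def Spec_solution (id_list : List String) (report : List String) (k : Int) (out : List Int) : Prop := out = solution_alt id_list report k
instance (id_list : List String) (report : List String) (k : Int) (out : List Int) : Decidable (Spec_solution id_list report k out) := by unfold Spec_solution; infer_instance

-- ===== CLAIM (what is proved, stated in full; the proofs are below) =====
def Claim_equal_solution : Prop := ∀ (id_list : List String) (report : List String) (k : Int), Dom_solution id_list report k → Pre_solution id_list report k → Spec_solution id_list report k (solution id_list report k)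

-- ===== LEMMAS AND PROOFS =====

def pvFst (r : String) : String := (pvParse r).getD 0 ""
def pvSnd (r : String) : String := (pvParse r).getD 1 ""

lemma pvSplit?_eq (r : String) :
    PySem.Str.split? r " " = some ((PySem.Chars.splitOn r.toList [' ']).map String.ofList) := by
  simp [PySem.Str.split?, PySem.Chars.split?]

lemma pvParse_eq (r : String) :
    pvParse r = (PySem.Chars.splitOn r.toList [' ']).map String.ofList := by
  simp [pvParse, pvSplit?_eq]

lemma pvParse_two {r : String} (h : (pvParse r).length = 2) :
    pvParse r = [pvFst r, pvSnd r] := by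
  obtain ⟨a, b, hab⟩ := List.length_eq_two.mp h
  simp [pvFst, pvSnd, hab]

lemma pvInter2 (sep a b : List Char) : ∀ xs : List (List Char),
    List.intercalate sep (xs ++ [a, b]) = List.intercalate sep (xs ++ [a ++ sep ++ b]) := by
  intro xs
  induction xs with
  | nil => simp [List.intercalate]
  | cons x t ih =>
      cases t with
      | nil => simp_all [List.intercalate]
      | cons y u => simp_all [List.intercalate]

-- s.split(sep) joined back with sep is s (sep ≠ ''): the go-loop invariant
lemma pvJoin_go (sep : List Char) (hsep : sep ≠ []) :
    ∀ (fuel : Nat) (l cur : List Char) (acc : List (List Char)), l.length ≤ fuel →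
      List.intercalate sep (PySem.Chars.splitOn.go sep fuel l cur acc) =
        List.intercalate sep (acc.reverse ++ [cur.reverse ++ l]) := by
  intro fuel
  induction fuel with
  | zero =>
      intro l cur acc hl
      have : l = [] := List.eq_nil_of_length_eq_zero (Nat.le_zero.mp hl)
      subst this
      simp [PySem.Chars.splitOn.go]
  | succ n ih =>
      intro l cur acc hl
      cases l with
      | nil => simp [PySem.Chars.splitOn.go]
      | cons c rest =>
          rw [PySem.Chars.splitOn.go]
          by_cases hp : sep.isPrefixOf (c :: rest) = true
          · simp only [hp, if_pos]
            rw [ih _ _ _ (by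
              have := List.IsPrefix.length_le (List.isPrefixOf_iff_prefix.mp hp)
              have hlen : (List.drop sep.length (c :: rest)).length = (c :: rest).length - sep.length := by simp
              have h1 : 1 ≤ sep.length := by cases sep; simp at hsep; simp
              simp at hl ⊢; omega)]
            have hpre := List.isPrefixOf_iff_prefix.mp hp
            obtain ⟨t, ht⟩ := hpre
            rw [← ht]
            simp only [List.drop_left' rfl, List.reverse_cons]
            have h2 := pvInter2 sep cur.reverse t acc.reverse
            simpa [List.append_assoc] using h2
          · simp only [hp, if_neg, Bool.not_eq_true]
            rw [ih _ _ _ (by simp at hl ⊢; omega)]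
            simp

lemma pvJoin_splitOn (s : List Char) (sep : List Char) (hsep : sep ≠ []) :
    List.intercalate sep (PySem.Chars.splitOn s sep) = s := by
  have := pvJoin_go sep hsep (s.length + 1) s [] [] (by omega)
  simpa [PySem.Chars.splitOn, List.intercalate] using this

lemma pvParse_inj {r r' : String} (h : pvParse r = pvParse r') : r = r' := by
  rw [pvParse_eq, pvParse_eq] at h
  have h2 : PySem.Chars.splitOn r.toList [' '] = PySem.Chars.splitOn r'.toList [' '] := by
    have hinj : Function.Injective String.ofList := fun a b hab => String.ofList_inj.mp hab
    exact (List.map_injective_iff.mpr hinj) h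
  have := congrArg (List.intercalate [' ']) h2
  rw [pvJoin_splitOn _ _ (by simp), pvJoin_splitOn _ _ (by simp)] at this
  exact String.toList_inj.mp this

-- per-reporter conditional counting loop (B's second pass)
lemma pvGetD_foldl_if_insert (q : String → Bool) (l : List (String × String))
    (d : PySem.Dict String Int) (a : String) :
    (l.foldl (fun d p => if q p.2 then d.insert p.1 (d.getD p.1 0 + 1) else d) d).getD a 0
      = d.getD a 0 + (List.countP (fun p => p.1 == a && q p.2) l : Int) := by
  induction l generalizing d with
  | nil => simp
  | cons p t ih =>
      simp only [List.foldl_cons, List.countP_cons, ih]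
      by_cases hq : q p.2
      · simp only [hq, if_pos]
        rw [PySem.Dict.getD_insert]
        by_cases ha : a = p.1
        · simp [ha]; ring
        · have : (p.1 == a) = false := by simp [Ne.symm ha]
          simp [ha, this]
      · simp [hq]

-- A's set-valued index built with Set.add coincides with list-append building when no pair repeats
lemma pvAddfold (l : List (String × String)) (u : PySem.Dict String (List String))
    (hnd : l.Nodup) (hfresh : ∀ p ∈ l, p.2 ∉ u.getD p.1 []) :
    l.foldl (fun u p => u.modify p.1 PySem.Set.empty (fun s => PySem.Set.add s p.2)) u
      = l.foldl (fun u p => u.modify p.1 [] (fun s => s ++ [p.2])) u := by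
  induction l generalizing u with
  | nil => rfl
  | cons p t ih =>
      simp only [List.foldl_cons]
      have hp2 : p.2 ∉ u.getD p.1 [] := hfresh p (List.mem_cons_self ..)
      have hstep : u.modify p.1 PySem.Set.empty (fun s => PySem.Set.add s p.2)
          = u.modify p.1 [] (fun s => s ++ [p.2]) := by
        simp only [PySem.Dict.modify, PySem.Set.add, PySem.Set.empty]
        simp [hp2]
      rw [hstep]
      apply ih _ (List.Nodup.of_cons hnd)
      intro q hq
      rw [PySem.Dict.modify, PySem.Dict.getD_insert]
      by_cases hq1 : q.1 = p.1
      · simp only [hq1, if_pos]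
        have hqp : q ≠ p := by
          rintro rfl; exact (List.nodup_cons.mp hnd).1 hq
        have hne : q.2 ≠ p.2 := by
          intro h2; exact hqp (Prod.ext hq1 h2)
        have := hfresh q (List.mem_cons_of_mem _ hq)
        rw [hq1] at this
        simp [this, hne]
      · simp only [if_neg hq1]
        exact hfresh q (List.mem_cons_of_mem _ hq)

lemma pvSplit?_parse (r : String) : PySem.Str.split? r " " = some (pvParse r) := by
  rw [pvSplit?_eq, pvParse_eq]

-- ===== VERDICT (by name: the statement is the Claim_ definition above) =====
theorem solution_spec : Claim_equal_solution := by
  intro id_list report k _hdom hpre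
  unfold Spec_solution solution solution_alt
  simp only [PySem.List.dedup_eq_ofList]
  have hL2 : ∀ r ∈ PySem.Set.ofList report, pvParse r = [pvFst r, pvSnd r] :=
    fun r hr => pvParse_two (hpre r ((PySem.Set.mem_ofList report r).mp hr))
  have hLnd : (PySem.Set.ofList report).Nodup := PySem.Set.nodup_ofList report
  have hstA : List.foldl solStepA (PySem.Dict.empty, PySem.Dict.empty) (PySem.Set.ofList report)
    = (PySem.Dict.counter ((PySem.Set.ofList report).map pvSnd),
       List.foldl (fun u x => u.modify (pvFst x) PySem.Set.empty (fun s => PySem.Set.add s (pvSnd x)))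
         PySem.Dict.empty (PySem.Set.ofList report)) := by
    rw [PySem.List.foldl_congr_mem _ _
        (fun st x => (st.1.modify (pvSnd x) 0 (· + 1),
                      st.2.modify (pvFst x) PySem.Set.empty (fun s => PySem.Set.add s (pvSnd x)))) _
        (by intro acc x hx; unfold solStepA; rw [pvSplit?_parse, hL2 x hx])]
    refine (PySem.List.foldl_prod_mk
        (fun (s : PySem.Dict String Int) x => s.modify (pvSnd x) 0 (· + 1))
        (fun (s : PySem.Dict String (PySem.Set String)) x =>
          s.modify (pvFst x) PySem.Set.empty (fun t => PySem.Set.add t (pvSnd x)))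
        _ _ _).trans ?_
    congr 1
    exact (List.foldl_map (f := pvSnd)
      (g := fun (d : PySem.Dict String Int) x => d.modify x 0 (· + 1))).symm
  rw [hstA]
  have hcong1 : ∀ (acc : PySem.Dict String Int), ∀ x ∈ PySem.Set.ofList report,
      solCntStep acc ((PySem.Str.split? x " ").getD [])
        = acc.insert (pvSnd x) (acc.getD (pvSnd x) 0 + 1) := by
    intro acc x hx
    rw [show (PySem.Str.split? x " ").getD [] = pvParse x from rfl, hL2 x hx]
    rfl
  have hcntB : List.foldl solCntStep PySem.Dict.empty
      (List.map (fun r => (PySem.Str.split? r " ").getD []) (PySem.Set.ofList report))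
    = PySem.Dict.counter (List.map pvSnd (PySem.Set.ofList report)) := by
    rw [List.foldl_map]
    rw [PySem.List.foldl_congr_mem _ _
        (fun (acc : PySem.Dict String Int) x => acc.insert (pvSnd x) (acc.getD (pvSnd x) 0 + 1)) _
        hcong1]
    exact (List.foldl_map (f := pvSnd)
      (g := fun (d : PySem.Dict String Int) x => d.insert x (d.getD x 0 + 1))).symm.trans
      (PySem.Dict.foldl_insert_getD_add_one_eq_counter _)
  simp only [hcntB]
  rw [PySem.List.foldl_append_singleton_eq_map]
  rw [List.nil_append]
  apply List.map_congr_left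
  intro i _
  set L := PySem.Set.ofList report with hLdef
  set C := PySem.Dict.counter (List.map pvSnd L) with hCdef
  set q : String → Bool := fun b => decide (C.getD b 0 ≥ k) with hqdef
  set Pairs := L.map (fun x => (pvFst x, pvSnd x)) with hPdef
  have hPnd : Pairs.Nodup := by
    refine List.Nodup.map_on ?_ hLnd
    intro x hx y hy hxy
    apply pvParse_inj
    rw [hL2 x hx, hL2 y hy]
    rw [Prod.mk.injEq] at hxy
    rw [hxy.1, hxy.2]
  have hU : (List.foldl (fun u x => u.modify (pvFst x) PySem.Set.empty fun s => PySem.Set.add s (pvSnd x))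
      PySem.Dict.empty L).getD i PySem.Set.empty
      = (Pairs.filter (fun p => p.1 == i)).map (fun p => p.2) := by
    have h1 : List.foldl (fun u x => u.modify (pvFst x) PySem.Set.empty fun s => PySem.Set.add s (pvSnd x))
        PySem.Dict.empty L
        = Pairs.foldl (fun u p => u.modify p.1 PySem.Set.empty fun s => PySem.Set.add s p.2)
            PySem.Dict.empty := by
      rw [hPdef, List.foldl_map]
    rw [h1, pvAddfold Pairs PySem.Dict.empty hPnd
      (by intro p _; simp [PySem.Dict.getD, PySem.Dict.empty, PySem.Dict.get?])]
    simpa using PySem.Dict.getD_foldl_modify_append Pairs PySem.Dict.empty i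
  have hb : ∀ x ∈ L, PySem.Set.contains (PySem.Set.ofList (List.filter q C.keys)) (pvSnd x)
      = q (pvSnd x) := by
    intro x hx
    have hmemkeys : pvSnd x ∈ C.keys := by
      rw [hCdef, PySem.Dict.keys_counter]
      exact (PySem.Set.mem_ofList _ _).mpr (List.mem_map_of_mem hx)
    by_cases h : C.getD (pvSnd x) 0 ≥ k
    · simp [PySem.Set.contains, hmemkeys, hqdef, h]
    · simp [PySem.Set.contains, hmemkeys, hqdef, h]
  rw [hU]
  have hfun : (fun (result : Int) j => if C.getD j 0 ≥ k then result + 1 else result)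
      = (fun result j => if q j = true then result + 1 else result) := by
    funext r j
    by_cases h : C.getD j 0 ≥ k <;> simp [hqdef, h]
  rw [hfun, PySem.List.foldl_count_if]
  have hcong2 : ∀ (acc : PySem.Dict String Int), ∀ x ∈ L,
      solResStep (PySem.Set.ofList (List.filter q C.keys)) acc ((PySem.Str.split? x " ").getD [])
        = (if q (pvSnd x) = true then acc.insert (pvFst x) (acc.getD (pvFst x) 0 + 1) else acc) := by
    intro acc x hx
    rw [show (PySem.Str.split? x " ").getD [] = pvParse x from rfl, hL2 x hx]
    show (if PySem.Set.contains (PySem.Set.ofList (List.filter q C.keys)) (pvSnd x) = true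
          then acc.insert (pvFst x) (acc.getD (pvFst x) 0 + 1) else acc) = _
    rw [hb x hx]
  have hres : (List.foldl (solResStep (PySem.Set.ofList (List.filter q C.keys))) PySem.Dict.empty
        (List.map (fun r => (PySem.Str.split? r " ").getD []) L)).getD i 0
      = 0 + (List.countP (fun p => p.1 == i && q p.2) Pairs : Int) := by
    rw [List.foldl_map]
    rw [PySem.List.foldl_congr_mem _ _
        (fun (acc : PySem.Dict String Int) x =>
          if q (pvSnd x) = true then acc.insert (pvFst x) (acc.getD (pvFst x) 0 + 1) else acc) _
        hcong2]
    have h2 : List.foldl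
        (fun (acc : PySem.Dict String Int) x =>
          if q (pvSnd x) = true then acc.insert (pvFst x) (acc.getD (pvFst x) 0 + 1) else acc)
        PySem.Dict.empty L
        = Pairs.foldl
            (fun d p => if q p.2 then d.insert p.1 (d.getD p.1 0 + 1) else d) PySem.Dict.empty := by
      rw [hPdef, List.foldl_map]
    rw [h2, pvGetD_foldl_if_insert]
    simp [PySem.Dict.getD, PySem.Dict.empty, PySem.Dict.get?]
  rw [hres]
  rw [List.countP_map, List.countP_filter]
  simp only [zero_add]
  norm_cast
  exact List.countP_congr (fun a _ => by simp [Function.comp, Bool.and_comm])
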